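-- pv_equiv track=rewrite | github.com/Wicho1313/Teoria-de-comunicaciones-y-Senales | Practica2/ConvolucionV2.py | getGi
-- ===== SOURCE A (Python) =====
-- def getGi(Xn,center):
--     Gi = 0
--     if center!=0:
--         while Gi < center:         #Vemos desde donde inicia la funcion X(n)
--             Gi += 1
--         Gi = (-1)*Gi
--     else:
--         Gi = 0
--
--     return Gi
-- ===== SOURCE B (Python) =====
-- def getGi(Xn, center):
--     # Closed form: the counting loop yields -center for positive center, else 0.
--     return -center if center > 0 else 0
-- ===== Notes on version B (the rewrite author's own statement) =====
-- stated objective: simpler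
-- what changed: Replaced the O(center) counting while-loop with a direct closed-form return -max(center, 0).
import Mathlib
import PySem

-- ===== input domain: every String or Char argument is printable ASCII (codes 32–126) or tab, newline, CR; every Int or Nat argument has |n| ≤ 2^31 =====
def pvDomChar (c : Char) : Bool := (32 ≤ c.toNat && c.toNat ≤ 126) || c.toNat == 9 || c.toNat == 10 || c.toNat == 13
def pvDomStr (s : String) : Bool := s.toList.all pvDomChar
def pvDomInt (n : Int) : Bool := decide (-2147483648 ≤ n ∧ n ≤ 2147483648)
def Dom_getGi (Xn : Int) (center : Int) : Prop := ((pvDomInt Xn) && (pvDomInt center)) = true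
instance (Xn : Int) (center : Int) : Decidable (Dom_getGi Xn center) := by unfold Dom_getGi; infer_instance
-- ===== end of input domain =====

-- B replaces A's counting while-loop by the closed form -max(center, 0): simpler and O(1).

-- ===== PORT A =====
-- the 'while Gi < center: Gi += 1' loop, step for step
def getGiLoop (Gi : Int) (center : Int) : Int :=
  if Gi < center then getGiLoop (Gi + 1) center else Gi
termination_by (center - Gi).toNat
decreasing_by
  have : center - (Gi + 1) < center - Gi := by omega
  omega

def getGi (Xn : Int) (center : Int) : Int :=
  if center ≠ 0 then (-1) * getGiLoop 0 center else 0

-- ===== PORT B =====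
def getGi_alt (Xn : Int) (center : Int) : Int :=
  if center > 0 then -center else 0

-- ===== PRECONDITION & SPEC =====
def Spec_getGi (Xn : Int) (center : Int) (out : Int) : Prop := out = getGi_alt Xn center
instance (Xn : Int) (center : Int) (out : Int) : Decidable (Spec_getGi Xn center out) := by unfold Spec_getGi; infer_instance

-- ===== CLAIM (what is proved, stated in full; the proofs are below) =====
def Claim_equal_getGi : Prop := ∀ (Xn : Int) (center : Int), Dom_getGi Xn center → Spec_getGi Xn center (getGi Xn center)

-- ===== LEMMAS AND PROOFS =====
-- the loop returns max Gi center
theorem getGiLoop_eq (Gi center : Int) : getGiLoop Gi center = max Gi center := by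
  unfold getGiLoop
  split_ifs with h
  · rw [getGiLoop_eq (Gi + 1) center]; omega
  · omega
termination_by (center - Gi).toNat
decreasing_by omega

-- ===== VERDICT (by name: the statement is the Claim_ definition above) =====
theorem getGi_spec : Claim_equal_getGi := by
  intro Xn center _
  unfold Spec_getGi getGi getGi_alt
  split_ifs with h h2 h2 <;> simp_all [getGiLoop_eq] <;> omega
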